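-- pv_equiv track=rewrite | github.com/GundalaNikhil/DSA | dsa-problems/Stacks/solutions/python/STK-008-canteen-token-climb-span.py | spans
-- ===== SOURCE A (Python) =====
-- def spans(demand: list[int]) -> list[int]:
--     n = len(demand)
--     result = [0] * n
--     stack = []  # Stores indices
--
--     for i in range(n):
--         # Pop elements strictly smaller than current
--         while stack and demand[stack[-1]] < demand[i]:
--             stack.pop()
--
--         # Calculate span based on top of stack
--         if not stack:
--             # No previous element >= current, so span includes all prior days
--             result[i] = i
--         elif demand[stack[-1]] == demand[i]:
--             # Found equal element, span resets to 0
--             result[i] = 0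
--         else:
--             # Found greater element, span is distance from previous >= element
--             result[i] = i - stack[-1] - 1
--
--         stack.append(i)
--
--     return result
-- ===== SOURCE B (Python) =====
-- def spans(demand: list[int]) -> list[int]:
--     return [_span_at(demand, i) for i in range(len(demand))]
--
--
-- def _span_at(demand: list[int], i: int) -> int:
--     # scan backward for the nearest previous index with demand >= demand[i]
--     j = i - 1
--     while j >= 0 and demand[j] < demand[i]:
--         j -= 1
--     if j < 0:
--         return i
--     if demand[j] == demand[i]:
--         return 0
--     return i - j - 1
-- ===== Notes on version B (the rewrite author's own statement) =====
-- stated objective: alternative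
-- what changed: Replaces the maintained monotonic index stack with a per-index naive backward scan to the nearest previous element >= current, trading O(n) for O(n^2) worst case but a far plainer traversal.
import Mathlib
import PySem

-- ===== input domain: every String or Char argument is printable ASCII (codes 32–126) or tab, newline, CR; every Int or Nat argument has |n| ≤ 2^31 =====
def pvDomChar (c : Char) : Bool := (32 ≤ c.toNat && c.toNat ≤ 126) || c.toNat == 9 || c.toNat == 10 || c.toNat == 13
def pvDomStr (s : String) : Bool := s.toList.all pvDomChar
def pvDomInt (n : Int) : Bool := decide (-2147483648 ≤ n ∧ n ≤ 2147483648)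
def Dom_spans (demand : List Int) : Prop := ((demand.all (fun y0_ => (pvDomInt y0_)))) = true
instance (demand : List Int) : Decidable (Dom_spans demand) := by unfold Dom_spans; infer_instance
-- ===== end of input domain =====

-- B replaces A's maintained monotonic index stack with a per-index naive backward scan; same values, plainer traversal.

-- ===== PORT A =====
-- the inner `while stack and demand[stack[-1]] < demand[i]: stack.pop()` loop (stack top = head)
def spansPop (demand : List Int) (v : Int) : List Nat → List Nat
  | [] => []
  | t :: rest => if demand.getD t 0 < v then spansPop demand v rest else t :: rest

-- the if/elif/else computing result[i] from the popped stack
def spansVal (demand : List Int) (i : Nat) : List Nat → Int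
  | [] => (i : Int)
  | t :: _ => if demand.getD t 0 = demand.getD i 0 then 0 else (i : Int) - (t : Int) - 1

-- one iteration of the `for i in range(n)` body over state (result, stack)
def spansStep (demand : List Int) (st : List Int × List Nat) (i : Nat) : List Int × List Nat :=
  let s := spansPop demand (demand.getD i 0) st.2
  (st.1.set i (spansVal demand i s), i :: s)

def spans (demand : List Int) : List Int :=
  ((List.range demand.length).foldl (spansStep demand) (List.replicate demand.length 0, [])).1

-- ===== PORT B =====
-- the `while j >= 0 and demand[j] < demand[i]: j -= 1` backward scan; `none` = scan fell off (j < 0)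
def scanBack (demand : List Int) (v : Int) : Nat → Option Nat
  | 0 => none
  | j + 1 => if demand.getD j 0 < v then scanBack demand v j else some j

-- _span_at from Source B
def spanAt (demand : List Int) (i : Nat) : Int :=
  match scanBack demand (demand.getD i 0) i with
  | none => (i : Int)
  | some j => if demand.getD j 0 = demand.getD i 0 then 0 else (i : Int) - (j : Int) - 1

def spans_alt (demand : List Int) : List Int :=
  (List.range demand.length).map (spanAt demand)

-- ===== PRECONDITION & SPEC =====
def Spec_spans (demand : List Int) (out : List Int) : Prop := out = spans_alt demand
instance (demand : List Int) (out : List Int) : Decidable (Spec_spans demand out) := by unfold Spec_spans; infer_instance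

-- ===== CLAIM (what is proved, stated in full; the proofs are below) =====
def Claim_equal_spans : Prop := ∀ (demand : List Int), Dom_spans demand → Spec_spans demand (spans demand)

-- ===== LEMMAS AND PROOFS =====

-- invariant of A's stack after processing indices 0..i-1: indices strictly decreasing from
-- the top, all < i, and every index below i missing from the stack is dominated by a later
-- stack index carrying strictly larger demand
def SpanInv (demand : List Int) (i : Nat) (stack : List Nat) : Prop :=
  stack.Pairwise (fun a b => b < a) ∧ (∀ j ∈ stack, j < i) ∧
  (∀ k, k < i → k ∉ stack → ∃ j ∈ stack, k < j ∧ demand.getD k 0 < demand.getD j 0)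

lemma spansPop_suffix (demand : List Int) (v : Int) (stack : List Nat) :
    ∃ t, stack = t ++ spansPop demand v stack ∧ ∀ x ∈ t, demand.getD x 0 < v := by
  induction stack with
  | nil => exact ⟨[], rfl, by simp⟩
  | cons a rest ih =>
    by_cases h : demand.getD a 0 < v
    · obtain ⟨t, ht, hall⟩ := ih
      refine ⟨a :: t, ?_, ?_⟩
      · rw [spansPop, if_pos h, List.cons_append, ← ht]
      · intro x hx; rcases List.mem_cons.mp hx with rfl | hx
        · exact h
        · exact hall x hx
    · exact ⟨[], by rw [spansPop, if_neg h]; simp, by simp⟩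

lemma spansPop_head (demand : List Int) (v : Int) (stack : List Nat) (j0 : Nat) (rest : List Nat)
    (h : spansPop demand v stack = j0 :: rest) : ¬ demand.getD j0 0 < v := by
  induction stack with
  | nil => simp [spansPop] at h
  | cons a r ih =>
    by_cases ha : demand.getD a 0 < v
    · rw [spansPop, if_pos ha] at h; exact ih h
    · rw [spansPop, if_neg ha] at h
      obtain ⟨rfl, _⟩ := List.cons.injEq .. ▸ h
      exact ha

lemma scanBack_none (demand : List Int) (v : Int) (i : Nat)
    (h : ∀ k, k < i → demand.getD k 0 < v) : scanBack demand v i = none := by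
  induction i with
  | zero => rfl
  | succ m ih =>
    rw [scanBack, if_pos (h m (Nat.lt_succ_self m))]
    exact ih fun k hk => h k (Nat.lt_succ_of_lt hk)

lemma scanBack_some (demand : List Int) (v : Int) (i j : Nat)
    (hj : j < i) (hge : ¬ demand.getD j 0 < v)
    (habove : ∀ k, j < k → k < i → demand.getD k 0 < v) :
    scanBack demand v i = some j := by
  induction i with
  | zero => omega
  | succ m ih =>
    rcases Nat.lt_succ_iff_lt_or_eq.mp hj with h | rfl
    · rw [scanBack, if_pos (habove m h (Nat.lt_succ_self m))]
      exact ih h fun k hk hkm => habove k hk (Nat.lt_succ_of_lt hkm)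
    · rw [scanBack, if_neg hge]

-- the value A computes at step i equals spanAt, under the invariant
lemma step_val (demand : List Int) (i : Nat) (stack : List Nat)
    (hInv : SpanInv demand i stack) :
    spansVal demand i (spansPop demand (demand.getD i 0) stack) = spanAt demand i := by
  obtain ⟨hpw, hlt, hdom⟩ := hInv
  obtain ⟨t, ht, hall⟩ := spansPop_suffix demand (demand.getD i 0) stack
  cases hpop : spansPop demand (demand.getD i 0) stack with
  | nil =>
    have hnone : scanBack demand (demand.getD i 0) i = none := by
      apply scanBack_none
      intro k hk
      by_cases hks : k ∈ stack
      · exact hall k (by rw [ht, hpop] at hks; simpa using hks)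
      · obtain ⟨j, hjs, _, hkj⟩ := hdom k hk hks
        have : demand.getD j 0 < demand.getD i 0 :=
          hall j (by rw [ht, hpop] at hjs; simpa using hjs)
        omega
    rw [spansVal, spanAt, hnone]
  | cons j0 rest =>
    have hj0s : j0 ∈ stack := by rw [ht, hpop]; simp
    have hj0i : j0 < i := hlt j0 hj0s
    have hj0ge : ¬ demand.getD j0 0 < demand.getD i 0 := spansPop_head _ _ _ _ _ hpop
    have hrest : ∀ x ∈ rest, x < j0 := by
      have hp : (j0 :: rest).Pairwise (fun a b => b < a) := by
        rw [ht, hpop] at hpw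
        exact (List.pairwise_append.mp hpw).2.1
      exact fun x hx => (List.pairwise_cons.mp hp).1 x hx
    have hsome : scanBack demand (demand.getD i 0) i = some j0 := by
      apply scanBack_some _ _ _ _ hj0i hj0ge
      intro k hk hki
      by_cases hks : k ∈ stack
      · rw [ht, hpop] at hks
        rcases List.mem_append.mp hks with hkt | hkc
        · exact hall k hkt
        · rcases List.mem_cons.mp hkc with rfl | hkr
          · omega
          · have := hrest k hkr; omega
      · obtain ⟨j, hjs, hkj, hdem⟩ := hdom k hki hks
        rw [ht, hpop] at hjs
        rcases List.mem_append.mp hjs with hjt | hjc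
        · have := hall j hjt; omega
        · rcases List.mem_cons.mp hjc with rfl | hjr
          · omega
          · have := hrest j hjr; omega
    rw [spansVal, spanAt, hsome]

lemma inv_step (demand : List Int) (i : Nat) (stack : List Nat)
    (hInv : SpanInv demand i stack) :
    SpanInv demand (i + 1) (i :: spansPop demand (demand.getD i 0) stack) := by
  obtain ⟨hpw, hlt, hdom⟩ := hInv
  obtain ⟨t, ht, hall⟩ := spansPop_suffix demand (demand.getD i 0) stack
  have hsub : ∀ x ∈ spansPop demand (demand.getD i 0) stack, x ∈ stack := by
    intro x hx; rw [ht]; exact List.mem_append_right t hx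
  refine ⟨?_, ?_, ?_⟩
  · refine List.pairwise_cons.mpr ⟨fun x hx => hlt x (hsub x hx), ?_⟩
    rw [ht] at hpw
    exact (List.pairwise_append.mp hpw).2.1
  · intro j hj
    rcases List.mem_cons.mp hj with rfl | hj
    · omega
    · exact Nat.lt_succ_of_lt (hlt j (hsub j hj))
  · intro k hk hks
    have hki : k ≠ i := fun h => hks (h ▸ List.mem_cons_self ..)
    have hk' : k < i := by omega
    by_cases hkst : k ∈ stack
    · rw [ht] at hkst
      rcases List.mem_append.mp hkst with hkt | hkp
      · exact ⟨i, List.mem_cons_self .., hk', hall k hkt⟩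
      · exact absurd (List.mem_cons_of_mem i hkp) hks
    · obtain ⟨j, hjs, hkj, hdem⟩ := hdom k hk' hkst
      rw [ht] at hjs
      rcases List.mem_append.mp hjs with hjt | hjp
      · have := hall j hjt
        exact ⟨i, List.mem_cons_self .., hk', by omega⟩
      · exact ⟨j, List.mem_cons_of_mem i hjp, hkj, hdem⟩

lemma set_append_cons {α : Type} (l₁ : List α) (m : Nat) (x v : α) (l₂ : List α)
    (h : l₁.length = m) : (l₁ ++ x :: l₂).set m v = l₁ ++ v :: l₂ := by
  subst h
  induction l₁ with
  | nil => rfl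
  | cons a r ih => simp [ih]

lemma foldl_inv (demand : List Int) (m : Nat) (hm : m ≤ demand.length) :
    ((List.range m).foldl (spansStep demand) (List.replicate demand.length 0, [])).1
      = (List.range m).map (spanAt demand) ++ List.replicate (demand.length - m) 0
    ∧ SpanInv demand m
        ((List.range m).foldl (spansStep demand) (List.replicate demand.length 0, [])).2 := by
  induction m with
  | zero =>
    refine ⟨by simp, by simp [SpanInv]⟩
  | succ m ih =>
    obtain ⟨hres, hinv⟩ := ih (by omega)
    rw [List.range_succ, List.foldl_append, List.foldl_cons, List.foldl_nil]
    constructor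
    · show (spansStep demand _ m).1 = _
      rw [spansStep]
      show (_ : List Int).set m _ = _
      rw [hres, step_val demand m _ hinv]
      have hrep : List.replicate (demand.length - m) (0 : Int)
          = (0 : Int) :: List.replicate (demand.length - (m + 1)) 0 := by
        have he : demand.length - m = (demand.length - (m + 1)) + 1 := by omega
        rw [he, List.replicate_succ]
      rw [hrep, set_append_cons _ m _ _ _ (by simp)]
      simp
    · show SpanInv demand (m + 1) (spansStep demand _ m).2
      rw [spansStep]
      exact inv_step demand m _ hinv

-- ===== VERDICT (by name: the statement is the Claim_ definition above) =====
theorem spans_spec : Claim_equal_spans := by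
  intro demand _
  show spans demand = spans_alt demand
  rw [spans, spans_alt, (foldl_inv demand demand.length le_rfl).1]
  simp
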